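-- pv_equiv track=rewrite | github.com/Kirza/stegano_unicode | app.py | encode_to_unicode
-- ===== SOURCE A (Python) =====
-- def encode_to_unicode(text, base_phrase='Hello'):
--     # Validate base phrase length
--     if len(base_phrase) > 300:
--         raise ValueError('Base phrase must not exceed 300 characters')
--     if not base_phrase:
--         raise ValueError('Base phrase cannot be empty')
--
--     # Convert text to binary
--     binary = ''.join(format(ord(c), '08b') for c in text)
--
--     # Use variation selectors to encode binary data
--     # We'll use VS1-VS8 (FE00-FE07) for encoding bits
--     result = base_phrase[:-1]  # Get all characters except the last one
--     last_char = base_phrase[-1]  # Get the last character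
--
--     # Start with the last character
--     encoded_last_char = last_char
--
--     for i in range(0, len(binary), 3):
--         chunk = binary[i:i+3]
--         # Pad the chunk with zeros if needed
--         chunk = chunk.ljust(3, '0')
--         # Convert binary chunk to decimal (0-7)
--         selector_num = int(chunk, 2)
--         # Add the variation selector
--         encoded_last_char += chr(0xFE00 + selector_num)
--
--     return result + encoded_last_char
-- ===== SOURCE B (Python) =====
-- def encode_to_unicode(text, base_phrase='Hello'):
--     # Validate base phrase length
--     if len(base_phrase) > 300:
--         raise ValueError('Base phrase must not exceed 300 characters')
--     if not base_phrase:
--         raise ValueError('Base phrase cannot be empty')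
--
--     # Stream the bits of the text directly into 3-bit variation selectors,
--     # with no intermediate binary string: acc holds the pending bits, n counts them.
--     out = []
--     acc = 0
--     n = 0
--     for ch in text:
--         acc = (acc << 8) | ord(ch)
--         n += 8
--         while n >= 3:
--             n -= 3
--             out.append(chr(0xFE00 + ((acc >> n) & 7)))
--             acc &= (1 << n) - 1  # drop the bits just consumed
--     if n:
--         # final partial chunk, right-padded with zero bits
--         out.append(chr(0xFE00 + ((acc << (3 - n)) & 7)))
--     return base_phrase[:-1] + base_phrase[-1] + ''.join(out)
-- ===== Notes on version B (the rewrite author's own statement) =====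
-- stated objective: alternative
-- what changed: B drops the intermediate binary digit string and its 3-character slicing, instead streaming each character's 8 bits through an integer accumulator with a pending-bit count and emitting one variation selector per 3 bits.
import Mathlib
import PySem

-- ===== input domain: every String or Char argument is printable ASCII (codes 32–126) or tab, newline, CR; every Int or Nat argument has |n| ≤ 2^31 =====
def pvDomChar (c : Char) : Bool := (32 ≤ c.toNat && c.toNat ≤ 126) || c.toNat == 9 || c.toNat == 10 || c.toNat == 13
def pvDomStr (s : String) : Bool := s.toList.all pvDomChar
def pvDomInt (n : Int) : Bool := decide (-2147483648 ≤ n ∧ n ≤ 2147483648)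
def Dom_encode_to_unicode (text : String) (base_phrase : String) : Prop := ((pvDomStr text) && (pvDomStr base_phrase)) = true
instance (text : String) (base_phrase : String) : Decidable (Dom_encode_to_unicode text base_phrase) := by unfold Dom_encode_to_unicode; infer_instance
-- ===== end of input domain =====

-- B streams the text's bits through an (acc, n) accumulator, emitting one variation
-- selector per 3 bits, instead of building an intermediate binary digit string and slicing it
-- in 3-character chunks (objective: alternative decomposition).


-- ===== PORT A =====
-- format(ord(c), '08b'): the 8 binary digits of a byte value, MSB first
-- (exact for v < 256; Dom admits only characters with code < 128)
def fmt08b (v : Nat) : List Char :=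
  (List.range 8).map (fun i => if (v >>> (7 - i)) &&& 1 = 1 then '1' else '0')

-- int(chunk, 2) on a string of '0'/'1' characters
def binChunkVal (chunk : List Char) : Nat :=
  chunk.foldl (fun a c => 2 * a + (if c = '1' then 1 else 0)) 0

-- the for-loop of A: step through binary three characters at a time;
-- chunk = binary[i:i+3] right-padded ('ljust') with '0' to length 3,
-- written with the slicing/padding expanded per remaining length
def aLoop : List Char → List Char
  | [] => []
  | [a] => [Char.ofNat (0xFE00 + binChunkVal [a, '0', '0'])]
  | [a, b] => [Char.ofNat (0xFE00 + binChunkVal [a, b, '0'])]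
  | a :: b :: c :: t => Char.ofNat (0xFE00 + binChunkVal [a, b, c]) :: aLoop t

def encode_to_unicode (text : String) (base_phrase : String) : String :=
  if 300 < base_phrase.length then ""        -- A raises ValueError (excluded by Pre_)
  else if base_phrase.length = 0 then ""     -- A raises ValueError (excluded by Pre_)
  else
    let binary := text.toList.flatMap (fun c => fmt08b c.toNat)
    let result := base_phrase.toList.dropLast          -- base_phrase[:-1]
    let last_char := base_phrase.toList.getLastD ' '   -- base_phrase[-1] (nonempty here)
    String.ofList (result ++ last_char :: aLoop binary)

-- ===== PORT B =====
-- the inner while-loop: while n >= 3, take 3 off n, emit a selector from the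
-- top 3 pending bits, mask the consumed bits away ('n >= 3' as the pattern n + 3)
def emitLoop : Nat → Nat → List Char → Nat × Nat × List Char
  | acc, n + 3, out =>
      emitLoop (acc &&& (2 ^ n - 1)) n
        (out ++ [Char.ofNat (0xFE00 + ((acc >>> n) &&& 7))])
  | acc, n, out => (acc, n, out)

-- the for-loop over text: shift in 8 bits per character, then drain
def bLoop (cs : List Char) (acc n : Nat) (out : List Char) : Nat × Nat × List Char :=
  match cs with
  | [] => (acc, n, out)
  | c :: cs' =>
    let s := emitLoop ((acc <<< 8) ||| c.toNat) (n + 8) out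
    bLoop cs' s.1 s.2.1 s.2.2

def encode_to_unicode_alt (text : String) (base_phrase : String) : String :=
  if 300 < base_phrase.length then ""        -- B raises ValueError (excluded by Pre_)
  else if base_phrase.length = 0 then ""     -- B raises ValueError (excluded by Pre_)
  else
    let s := bLoop text.toList 0 0 []
    let out := if s.2.1 ≠ 0
      then s.2.2 ++ [Char.ofNat (0xFE00 + ((s.1 <<< (3 - s.2.1)) &&& 7))]
      else s.2.2
    String.ofList (base_phrase.toList.dropLast ++ base_phrase.toList.getLastD ' ' :: out)
-- ===== PRECONDITION & SPEC =====
-- Pre_ excludes exactly the inputs on which A raises ValueError: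
-- an empty base phrase or one longer than 300 characters.
def Pre_encode_to_unicode (text : String) (base_phrase : String) : Prop :=
  base_phrase.length ≠ 0 ∧ base_phrase.length ≤ 300
instance (text : String) (base_phrase : String) : Decidable (Pre_encode_to_unicode text base_phrase) := by unfold Pre_encode_to_unicode; infer_instance

def pvWitness_encode_to_unicode : String × String := ("Hi", "Hello")

def Spec_encode_to_unicode (text : String) (base_phrase : String) (out : String) : Prop := out = encode_to_unicode_alt text base_phrase
instance (text : String) (base_phrase : String) (out : String) : Decidable (Spec_encode_to_unicode text base_phrase out) := by unfold Spec_encode_to_unicode; infer_instance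

-- ===== CLAIM (what is proved, stated in full; the proofs are below) =====
def Claim_equal_encode_to_unicode : Prop := ∀ (text : String) (base_phrase : String), Dom_encode_to_unicode text base_phrase → Pre_encode_to_unicode text base_phrase → Spec_encode_to_unicode text base_phrase (encode_to_unicode text base_phrase)

-- ===== LEMMAS AND PROOFS =====

-- pending bits as '0'/'1' characters, MSB first, width n
def natBits : Nat → Nat → List Char
  | 0, _ => []
  | k + 1, a => natBits k (a / 2) ++ [if a % 2 = 1 then '1' else '0']

-- the final partial chunk B appends
def finChunk (acc n : Nat) : List Char :=
  if n ≠ 0 then [Char.ofNat (0xFE00 + ((acc <<< (3 - n)) &&& 7))] else []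

lemma aLoop_split (x y : List Char) (h : x.length % 3 = 0) :
    aLoop (x ++ y) = aLoop x ++ aLoop y := by
  induction x using aLoop.induct with
  | case1 => simp [aLoop]
  | case2 a => simp at h
  | case3 a b => simp at h
  | case4 a b c t ih =>
    simp only [List.cons_append, aLoop]
    rw [ih (by simp at h; omega)]

lemma emitLoop_append (n : Nat) : ∀ acc out, emitLoop acc n out =
    ((emitLoop acc n []).1, (emitLoop acc n []).2.1, out ++ (emitLoop acc n []).2.2) := by
  induction n using Nat.strong_induction_on with
  | _ n ih =>
    intro acc out
    match n with
    | 0 => simp [emitLoop]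
    | 1 => simp [emitLoop]
    | 2 => simp [emitLoop]
    | n' + 3 =>
      simp only [emitLoop, List.nil_append]
      rw [ih n' (by omega) _ (out ++ [_]), ih n' (by omega) _ [_]]
      simp

lemma base_fact : ∀ n < 3, ∀ acc < 2 ^ n, finChunk acc n = aLoop (natBits n acc) := by
  decide

lemma step_fact : ∀ n < 3, ∀ acc < 2 ^ n, ∀ v < 128,
    (emitLoop ((acc <<< 8) ||| v) (n + 8) []).2.1 < 3 ∧
    (emitLoop ((acc <<< 8) ||| v) (n + 8) []).1 <
      2 ^ (emitLoop ((acc <<< 8) ||| v) (n + 8) []).2.1 ∧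
    ((natBits n acc ++ fmt08b v).take
        (n + 8 - (emitLoop ((acc <<< 8) ||| v) (n + 8) []).2.1)).length % 3 = 0 ∧
    aLoop ((natBits n acc ++ fmt08b v).take
        (n + 8 - (emitLoop ((acc <<< 8) ||| v) (n + 8) []).2.1)) =
      (emitLoop ((acc <<< 8) ||| v) (n + 8) []).2.2 ∧
    natBits n acc ++ fmt08b v =
      ((natBits n acc ++ fmt08b v).take
        (n + 8 - (emitLoop ((acc <<< 8) ||| v) (n + 8) []).2.1)) ++
      natBits (emitLoop ((acc <<< 8) ||| v) (n + 8) []).2.1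
        (emitLoop ((acc <<< 8) ||| v) (n + 8) []).1 := by
  decide

lemma main_inv : ∀ (cs : List Char) (acc n : Nat) (out : List Char),
    n < 3 → acc < 2 ^ n → (∀ c ∈ cs, c.toNat < 128) →
    (bLoop cs acc n out).2.2 ++ finChunk (bLoop cs acc n out).1 (bLoop cs acc n out).2.1 =
      out ++ aLoop (natBits n acc ++ cs.flatMap (fun c => fmt08b c.toNat)) := by
  intro cs
  induction cs with
  | nil =>
    intro acc n out hn ha _
    simp only [bLoop, List.flatMap_nil, List.append_nil]
    rw [← base_fact n hn acc ha]
  | cons c cs ih =>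
    intro acc n out hn ha hc
    have hv : c.toNat < 128 := hc c (List.mem_cons_self)
    obtain ⟨h1, h2, h3, h4, h5⟩ := step_fact n hn acc ha c.toNat hv
    have key : aLoop (natBits n acc ++ (fmt08b c.toNat ++ cs.flatMap (fun c => fmt08b c.toNat))) =
        (emitLoop ((acc <<< 8) ||| c.toNat) (n + 8) []).2.2 ++
          aLoop (natBits (emitLoop ((acc <<< 8) ||| c.toNat) (n + 8) []).2.1
              (emitLoop ((acc <<< 8) ||| c.toNat) (n + 8) []).1 ++
            cs.flatMap (fun c => fmt08b c.toNat)) := by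
      conv_lhs => rw [← List.append_assoc, h5, List.append_assoc]
      rw [aLoop_split _ _ h3, h4]
    simp only [bLoop]
    rw [emitLoop_append]
    rw [ih _ _ _ h1 h2 (fun x hx => hc x (List.mem_cons_of_mem _ hx))]
    simp only [List.flatMap_cons]
    rw [key, ← List.append_assoc]

-- ===== VERDICT (by name: the statement is the Claim_ definition above) =====
theorem encode_to_unicode_spec : Claim_equal_encode_to_unicode := by
  intro text base hdom hpre
  unfold Spec_encode_to_unicode encode_to_unicode encode_to_unicode_alt
  obtain ⟨hne, hle⟩ := hpre
  rw [if_neg (by omega), if_neg (by omega), if_neg (by omega), if_neg (by omega)]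
  have hc : ∀ c ∈ text.toList, c.toNat < 128 := by
    intro c hcmem
    have hch : pvDomChar c = true := by
      unfold Dom_encode_to_unicode pvDomStr at hdom
      simp only [Bool.and_eq_true, List.all_eq_true] at hdom
      exact hdom.1 c hcmem
    unfold pvDomChar at hch
    simp only [Bool.or_eq_true, Bool.and_eq_true, decide_eq_true_eq, beq_iff_eq] at hch
    omega
  have h := main_inv text.toList 0 0 [] (by decide) (by decide) hc
  simp only [natBits, List.nil_append] at h
  simp only [← h, finChunk]
  split <;> simp
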